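-- pv_equiv track=rewrite | github.com/evelynxu229/Auto_PDF_OCR | code/shPdfOcr.py | solvemistake
-- ===== SOURCE A (Python) =====
-- def solvemistake(res):
--     ##--将识别为一行的数据进行拆分--###
--     copy = res.copy() #复制res列表【不能用copy=res, 该方式当修改copy时, res也会修改】
--     for j in range(len(copy)):
--         item=copy[j]
--         if item.count('.') > 1:  #多个框的数字识别到一个字符串中
--             temp=[] #字符串中各个数字组成的列表
--             idx=[-1] #字符串中小数点的id
--             for i in range(len(item)):
--                 if item[i]=='.' : idx.append(i+1)
--             for i in range(len(idx)-1):
--                 each = item[idx[i]+1: idx[i+1]+1]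
--                 temp.append(each)
--
--             iddel=res.index(item) #待删除的item在res中的id
--             res = res[:iddel] + temp + res[iddel+1:] #不取l[iddel]
--
--     res=[i.replace(' ','')  for i in res] #去除空格
--     res=[i.replace(',','.') for i in res] #逗号换成小数点
--     return res
-- ===== SOURCE B (Python) =====
-- def solvemistake(res):
--     out = []
--     for item in res:
--         if item.count('.') > 1:
--             bounds = [i + 2 for i in range(len(item)) if item[i] == '.']
--             out.extend(item[a:b] for a, b in zip([0] + bounds, bounds))
--         else:
--             out.append(item)
--     return [i.replace(' ', '').replace(',', '.') for i in out]
-- ===== Notes on version B (the rewrite author's own statement) =====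
-- stated objective: alternative
-- what changed: B builds the result in one forward pass, extending it with each item's split pieces, instead of A's re-scanning res with res.index and rebuilding it by slice-splice for every multi-dot item; the dot positions come from one range/zip comprehension instead of A's sentinel idx list loops, and the two cleanup passes become one.
-- outside the precondition, e.g. on solvemistake(['a..b', 'a..']): A returns ['a..', '', 'b', 'a..'], B returns ['a..', 'b', 'a..', '']
import Mathlib
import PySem

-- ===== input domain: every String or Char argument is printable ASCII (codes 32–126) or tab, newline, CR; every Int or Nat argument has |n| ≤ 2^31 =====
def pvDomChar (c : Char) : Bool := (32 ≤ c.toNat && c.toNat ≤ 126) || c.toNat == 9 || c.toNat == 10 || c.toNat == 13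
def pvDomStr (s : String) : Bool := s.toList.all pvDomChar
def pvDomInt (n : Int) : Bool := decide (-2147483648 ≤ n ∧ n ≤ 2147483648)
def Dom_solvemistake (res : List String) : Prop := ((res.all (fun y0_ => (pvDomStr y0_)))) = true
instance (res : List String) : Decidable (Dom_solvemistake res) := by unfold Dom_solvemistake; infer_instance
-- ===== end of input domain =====

-- B replaces A's per-item res.index lookup and slice-splice rebuild with a single forward pass
-- that extends the output with each item's split pieces (objective: alternative).

-- ===== PORT A =====
def solvemistake (res : List String) : List String :=
  let copy := res
  let res2 := (PySem.List.pyRange 0 (copy.length : Int) 1).foldl (fun res j =>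
    let item := PySem.List.pyGetD copy j ""
    if PySem.Str.count item "." > 1 then
      let idx : List Int := (PySem.List.pyRange 0 (PySem.Str.len item) 1).foldl
        (fun idx i => if PySem.Str.pyGet? item i = some '.' then idx ++ [i + 1] else idx) [-1]
      let temp : List String := (PySem.List.pyRange 0 ((idx.length : Int) - 1) 1).foldl
        (fun temp i => temp ++ [PySem.Str.slice item (some (PySem.List.pyGetD idx i 0 + 1))
                                  (some (PySem.List.pyGetD idx (i + 1) 0 + 1))]) []
      match PySem.List.index? res item with
      | some iddel => PySem.List.slice res none (some (iddel : Int)) ++ temp ++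
                      PySem.List.slice res (some ((iddel : Int) + 1)) none
      | none => res   -- unreachable: item is always present in res (Python never raises here)
    else res) res
  let res3 := res2.map (fun i => PySem.Str.replace i " " "")
  res3.map (fun i => PySem.Str.replace i "," ".")

-- ===== PORT B =====
def splitPieces (item : String) : List String :=
  let bounds : List Int := ((PySem.List.pyRange 0 (PySem.Str.len item) 1).filter
      (fun i => decide (PySem.Str.pyGet? item i = some '.'))).map (fun i => i + 2)
  ((0 :: bounds).zip bounds).map (fun p => PySem.Str.slice item (some p.1) (some p.2))

def solvemistake_alt (res : List String) : List String :=
  let out := res.foldl (fun out item =>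
    if PySem.Str.count item "." > 1 then out ++ splitPieces item else out ++ [item]) []
  out.map (fun i => PySem.Str.replace (PySem.Str.replace i " " "") "," ".")

-- ===== PRECONDITION & SPEC =====
-- Pre_ excludes inputs where some later multi-dot entry equals a split piece of an earlier
-- multi-dot entry: there A's res.index finds the inserted piece instead of the original entry
-- and splices at that accidental position — a first-match artefact of A's implementation.
def Pre_solvemistake (res : List String) : Prop :=
  List.Pairwise (fun x y => PySem.Str.count x "." > 1 → PySem.Str.count y "." > 1 →
    y ∉ splitPieces x) res
instance (res : List String) : Decidable (Pre_solvemistake res) := by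
  unfold Pre_solvemistake; infer_instance
def pvWitness_solvemistake : List String := ["1.2 3.", "4,5"]
def Spec_solvemistake (res : List String) (out : List String) : Prop := out = solvemistake_alt res
instance (res : List String) (out : List String) : Decidable (Spec_solvemistake res out) := by unfold Spec_solvemistake; infer_instance

-- ===== CLAIM (what is proved, stated in full; the proofs are below) =====
def Claim_equal_solvemistake : Prop := ∀ (res : List String), Dom_solvemistake res → Pre_solvemistake res → Spec_solvemistake res (solvemistake res)

-- ===== LEMMAS AND PROOFS =====

-- the image of one entry in the final list (before the space/comma cleanup)
def pvImage (item : String) : List String :=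
  if PySem.Str.count item "." > 1 then splitPieces item else [item]

-- A's body for one item, as a named function (the lambda in port A, with `copy[j]` abstracted)
def pvStepA (res : List String) (item : String) : List String :=
  if PySem.Str.count item "." > 1 then
    let idx : List Int := (PySem.List.pyRange 0 (PySem.Str.len item) 1).foldl
      (fun idx i => if PySem.Str.pyGet? item i = some '.' then idx ++ [i + 1] else idx) [-1]
    let temp : List String := (PySem.List.pyRange 0 ((idx.length : Int) - 1) 1).foldl
      (fun temp i => temp ++ [PySem.Str.slice item (some (PySem.List.pyGetD idx i 0 + 1))
                                (some (PySem.List.pyGetD idx (i + 1) 0 + 1))]) []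
    match PySem.List.index? res item with
    | some iddel => PySem.List.slice res none (some (iddel : Int)) ++ temp ++
                    PySem.List.slice res (some ((iddel : Int) + 1)) none
    | none => res
  else res

theorem pvConsecMap (l : List Int) (d : Int) (f : Int → Int → String) :
    (List.range (l.length - 1)).map (fun k => f (l.getD k d) (l.getD (k + 1) d))
      = (l.zip l.tail).map (fun p => f p.1 p.2) := by
  induction l with
  | nil => simp
  | cons a t ih =>
    cases t with
    | nil => simp
    | cons b t' =>
      simp only [List.length_cons, Nat.add_sub_cancel, List.range_succ_eq_map,
        List.map_map, List.map_cons]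
      simp only [List.getD_cons_zero, List.getD_cons_succ]
      refine congrArg _ ?_
      have := ih
      simp only [List.length_cons, Nat.add_sub_cancel] at this ⊢
      simpa [Function.comp_def, List.zip, List.map_zipWith] using this

theorem pvTemp_eq (item : String) :
    ((PySem.List.pyRange 0
        ((((PySem.List.pyRange 0 (PySem.Str.len item) 1).foldl
            (fun idx i => if PySem.Str.pyGet? item i = some '.' then idx ++ [i + 1] else idx)
            [-1]).length : Int) - 1) 1).foldl
      (fun temp i => temp ++ [PySem.Str.slice item
          (some (PySem.List.pyGetD ((PySem.List.pyRange 0 (PySem.Str.len item) 1).foldl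
              (fun idx i => if PySem.Str.pyGet? item i = some '.' then idx ++ [i + 1] else idx)
              [-1]) i 0 + 1))
          (some (PySem.List.pyGetD ((PySem.List.pyRange 0 (PySem.Str.len item) 1).foldl
              (fun idx i => if PySem.Str.pyGet? item i = some '.' then idx ++ [i + 1] else idx)
              [-1]) (i + 1) 0 + 1))]) [])
    = splitPieces item := by
  rw [PySem.List.foldl_append_ite (p := fun i => PySem.Str.pyGet? item i = some '.')
      (f := fun i => i + 1)]
  rw [PySem.List.foldl_append_singleton_eq_map]
  set F := (PySem.List.pyRange 0 (PySem.Str.len item) 1).filter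
      (fun i => decide (PySem.Str.pyGet? item i = some '.')) with hF
  set D := F.map (fun i => i + 1) with hD
  have hlen : ((([-1] ++ D : List Int).length : Int) - 1) = (D.length : Nat) := by
    simp
  rw [hlen, PySem.List.pyRange_zero_natCast, List.map_map]
  simp only [List.nil_append, Function.comp_def]
  have hcast : ∀ k : Nat, ((k : Int) + 1) = ((k + 1 : Nat) : Int) := by
    intro k; push_cast; ring
  simp only [hcast, PySem.List.pyGetD_natCast]
  have hlen2 : D.length = ([-1] ++ D : List Int).length - 1 := by simp
  rw [hlen2, pvConsecMap ([-1] ++ D) 0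
      (fun a b => PySem.Str.slice item (some (a + 1)) (some (b + 1)))]
  have hmap1 : (fun i : Int => i + 1 + 1) = fun i : Int => i + 2 := by funext i; ring
  simp only [splitPieces, ← hF, List.singleton_append, List.tail_cons]
  have hb2 : F.map (fun i => i + 2) = D.map (fun i => i + 1) := by
    simp [hD, List.map_map, Function.comp_def, hmap1]
  have hb1 : (0 : Int) :: F.map (fun i => i + 2) = ((-1 : Int) :: D).map (fun i => i + 1) := by
    simp [hb2]
  rw [hb1, hb2, List.zip_map]
  simp [Function.comp_def, Prod.map]

theorem pvIndexAt (pre rest : List String) (item : String) (h : item ∉ pre) :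
    PySem.List.index? (pre ++ item :: rest) item = some pre.length := by
  rw [PySem.List.index?_eq_some_iff]
  exact ⟨pre, rest, rfl, rfl, h⟩

theorem pvSliceTake (pre rest : List String) (item : String) :
    PySem.List.slice (pre ++ item :: rest) none (some ((pre.length : Nat) : Int)) = pre := by
  rw [PySem.List.slice_to_natCast]
  exact List.take_left

theorem pvSliceDrop (pre rest : List String) (item : String) :
    PySem.List.slice (pre ++ item :: rest) (some (((pre.length : Nat) : Int) + 1)) none = rest := by
  have h1 : (((pre.length : Nat) : Int) + 1) = (((pre.length + 1 : Nat)) : Int) := by push_cast; ring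
  rw [h1, PySem.List.slice_from_natCast]
  have h2 : pre ++ item :: rest = (pre ++ [item]) ++ rest := by simp
  rw [h2]
  have h3 : (pre ++ [item]).length = pre.length + 1 := by simp
  rw [← h3]
  exact List.drop_left

theorem pvLoopA (suffix : List String) : ∀ (pre : List String),
    (∀ y ∈ suffix, PySem.Str.count y "." > 1 → y ∉ pre) →
    suffix.Pairwise (fun x y => PySem.Str.count x "." > 1 →
      PySem.Str.count y "." > 1 → y ∉ splitPieces x) →
    suffix.foldl pvStepA (pre ++ suffix) = pre ++ suffix.flatMap pvImage := by
  induction suffix with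
  | nil => intro pre _ _; simp
  | cons item rest ih =>
    intro pre hpre hpw
    obtain ⟨hhead, htail⟩ := List.pairwise_cons.mp hpw
    simp only [List.foldl_cons]
    by_cases hmd : PySem.Str.count item "." > 1
    · have hnotpre : item ∉ pre := hpre item (by simp) hmd
      have hstep : pvStepA (pre ++ item :: rest) item = (pre ++ splitPieces item) ++ rest := by
        simp only [pvStepA, if_pos hmd]
        rw [pvIndexAt pre rest item hnotpre]
        rw [pvTemp_eq item]
        simp only [pvSliceTake pre rest item, pvSliceDrop pre rest item, List.append_assoc]
      rw [hstep, ih (pre ++ splitPieces item) ?_ htail]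
      · simp only [List.flatMap_cons, pvImage, if_pos hmd, List.append_assoc]
      · intro y hy hmy
        simp only [List.mem_append, not_or]
        exact ⟨hpre y (List.mem_cons_of_mem _ hy) hmy, hhead y hy hmd hmy⟩
    · have hstep : pvStepA (pre ++ item :: rest) item = (pre ++ [item]) ++ rest := by
        unfold pvStepA
        rw [if_neg hmd]
        simp
      rw [hstep, ih (pre ++ [item]) ?_ htail]
      · simp only [List.flatMap_cons, pvImage, if_neg hmd, List.append_assoc,
          List.singleton_append]
      · intro y hy hmy
        simp only [List.mem_append, List.mem_singleton, not_or]
        refine ⟨hpre y (List.mem_cons_of_mem _ hy) hmy, ?_⟩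
        intro hEq
        rw [hEq] at hmy
        exact hmd hmy

-- ===== VERDICT (by name: the statement is the Claim_ definition above) =====
theorem solvemistake_spec : Claim_equal_solvemistake := by
  intro res _hdom hpre
  unfold Spec_solvemistake
  have key := PySem.List.foldl_pyRange_zero_pyGetD' res "" pvStepA res
  have hA : solvemistake res =
      ((res.foldl pvStepA res).map (fun i => PySem.Str.replace i " " "")).map
        (fun i => PySem.Str.replace i "," ".") := by
    calc solvemistake res
        = (((PySem.List.pyRange 0 ((res.length : Int)) 1).foldl
              (fun acc j => pvStepA acc (PySem.List.pyGetD res j "")) res).map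
            (fun i => PySem.Str.replace i " " "")).map
            (fun i => PySem.Str.replace i "," ".") := rfl
      _ = _ := by rw [key]
  have hB : solvemistake_alt res =
      (res.flatMap pvImage).map
        (fun i => PySem.Str.replace (PySem.Str.replace i " " "") "," ".") := by
    unfold solvemistake_alt
    have hstep : (fun (out : List String) (item : String) =>
        if PySem.Str.count item "." > 1 then out ++ splitPieces item else out ++ [item])
        = fun out item => out ++ pvImage item := by
      funext out item
      unfold pvImage
      split <;> rfl
    rw [hstep, PySem.List.foldl_append_eq_flatMap]
    simp
  have hloop : res.foldl pvStepA res = res.flatMap pvImage := by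
    simpa using pvLoopA res [] (by simp) hpre
  rw [hA, hloop, hB, List.map_map]
  rfl
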